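-- pv_equiv track=rewrite | github.com/joelrorseth/RAG-TheoremQA | src/evaluation/theoremqa.py | extract_predicted_answer
-- ===== SOURCE A (Python) =====
-- def extract_predicted_answer(result: str) -> str:
--     prediction = result.strip().strip('\n').split('\n')[-1]
--     tmp = ''
--     for entry in prediction.split(' ')[::-1]:
--         if entry == 'is' or entry == 'be' or entry == 'are' or entry.endswith(':'):
--             break
--         tmp = entry + ' ' + tmp
--     prediction = tmp.strip().strip('.')
--     return prediction
-- ===== SOURCE B (Python) =====
-- def extract_predicted_answer(result: str) -> str:
--     prediction = result.strip().strip('\n').split('\n')[-1]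
--     words = prediction.split(' ')
--     cut = -1
--     for i, w in enumerate(words):
--         if w == 'is' or w == 'be' or w == 'are' or w.endswith(':'):
--             cut = i
--     return ' '.join(words[cut + 1:]).strip().strip('.')
-- ===== Notes on version B (the rewrite author's own statement) =====
-- stated objective: alternative
-- what changed: Replaces the reverse iteration that accumulates words into a growing string and breaks at the first delimiter word by a forward scan that records the index of the last delimiter word, followed by a single slice-and-join.
import Mathlib
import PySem

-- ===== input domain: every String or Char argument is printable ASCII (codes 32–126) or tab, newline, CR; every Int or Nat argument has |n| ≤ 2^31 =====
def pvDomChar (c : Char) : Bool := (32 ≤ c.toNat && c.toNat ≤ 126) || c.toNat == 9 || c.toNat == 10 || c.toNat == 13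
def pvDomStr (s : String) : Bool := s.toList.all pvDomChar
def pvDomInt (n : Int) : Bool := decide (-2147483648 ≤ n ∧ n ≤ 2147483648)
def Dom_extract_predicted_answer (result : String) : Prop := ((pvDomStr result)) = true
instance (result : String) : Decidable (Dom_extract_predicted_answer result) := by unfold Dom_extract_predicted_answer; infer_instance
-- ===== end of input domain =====

-- B replaces A's reverse accumulation-with-break by a forward scan for the last delimiter index
-- followed by one slice-and-join (objective: alternative decomposition, same cost).

-- shared one-line predicate: the Python condition "entry == 'is' or entry == 'be' or entry == 'are' or entry.endswith(':')"
def pvDelim (w : List Char) : Bool :=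
  w == "is".toList || w == "be".toList || w == "are".toList || PySem.Chars.endswith w [':']

-- ===== PORT A =====
-- the for-loop over prediction.split(' ')[::-1] with its break, state tmp
def pvALoop (tmp : List Char) : List (List Char) → List Char
  | [] => tmp
  | e :: rest => if pvDelim e then tmp else pvALoop (e ++ ' ' :: tmp) rest

def extract_predicted_answer (result : String) : String :=
  -- result.strip().strip('\n').split('\n')[-1]
  let s := PySem.Chars.stripChars (PySem.Chars.strip result.toList) ['\n']
  let prediction := PySem.List.pyGetD (PySem.Chars.splitOn s ['\n']) (-1) []
  -- for entry in prediction.split(' ')[::-1]: …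
  let tmp := pvALoop []
      ((PySem.List.slice? (PySem.Chars.splitOn prediction [' ']) none none (-1)).getD [])
  -- tmp.strip().strip('.')
  String.ofList (PySem.Chars.stripChars (PySem.Chars.strip tmp) ['.'])

-- ===== PORT B =====
def extract_predicted_answer_alt (result : String) : String :=
  let s := PySem.Chars.stripChars (PySem.Chars.strip result.toList) ['\n']
  let prediction := PySem.List.pyGetD (PySem.Chars.splitOn s ['\n']) (-1) []
  let words := PySem.Chars.splitOn prediction [' ']
  -- cut = -1; for i, w in enumerate(words): if <delim>: cut = i
  let cut := (PySem.List.enumerate words 0).foldl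
      (fun c p => if pvDelim p.2 then p.1 else c) (-1)
  -- ' '.join(words[cut+1:]).strip().strip('.')
  String.ofList (PySem.Chars.stripChars
    (PySem.Chars.strip (PySem.Chars.join [' '] (PySem.List.slice words (some (cut + 1)) none))) ['.'])

-- ===== PRECONDITION & SPEC =====
def Spec_extract_predicted_answer (result : String) (out : String) : Prop := out = extract_predicted_answer_alt result
instance (result : String) (out : String) : Decidable (Spec_extract_predicted_answer result out) := by unfold Spec_extract_predicted_answer; infer_instance

-- ===== CLAIM (what is proved, stated in full; the proofs are below) =====
def Claim_equal_extract_predicted_answer : Prop := ∀ (result : String), Dom_extract_predicted_answer result → Spec_extract_predicted_answer result (extract_predicted_answer result)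

-- ===== LEMMAS AND PROOFS =====

-- A's loop over rs: it concatenates (word ++ " ") for the words before the first delimiter, reversed, in front of tmp
theorem pvALoop_eq (rs : List (List Char)) : ∀ tmp,
    pvALoop tmp rs =
      ((rs.takeWhile (fun e => !pvDelim e)).reverse.map (· ++ [' '])).flatten ++ tmp := by
  induction rs with
  | nil => intro tmp; simp [pvALoop]
  | cons e rest ih =>
    intro tmp
    by_cases h : pvDelim e
    · simp [pvALoop, h]
    · simp [pvALoop, h, ih]

-- B's cut: slicing at cut+1 keeps exactly the words after the last delimiter
theorem pvCut_eq (ws : List (List Char)) :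
    PySem.List.slice ws (some ((PySem.List.enumerate ws 0).foldl (fun c p => if pvDelim p.2 then p.1 else c) (-1) + 1)) none =
      (ws.reverse.takeWhile (fun e => !pvDelim e)).reverse ∧
    -1 ≤ (PySem.List.enumerate ws 0).foldl (fun c p => if pvDelim p.2 then p.1 else c) (-1) ∧
    (PySem.List.enumerate ws 0).foldl (fun c p => if pvDelim p.2 then p.1 else c) (-1) + 1 ≤ ws.length := by
  induction ws using List.reverseRecOn with
  | nil => refine ⟨?_, by norm_num, by simp⟩; decide
  | append_singleton ws' w ih =>
    obtain ⟨ih1, ih2, ih3⟩ := ih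
    rw [PySem.List.enumerate_append, List.foldl_append]
    simp only [PySem.List.enumerate, List.foldl_cons, List.foldl_nil]
    by_cases hd : pvDelim w
    · simp only [hd, if_pos]
      refine ⟨?_, by omega, by simp⟩
      rw [PySem.List.slice_from (ws' ++ [w]) (by omega)]
      simp [hd]
    · simp only [hd, Bool.false_eq_true, if_false]
      refine ⟨?_, ih2, by simp; omega⟩
      rw [PySem.List.slice_from (ws' ++ [w]) (by omega)]
      rw [PySem.List.slice_from ws' (by omega)] at ih1
      rw [List.drop_append_of_le_length (by omega), ih1]
      simp [hd]

-- flatten of (word ++ " ") pieces is the ' '-join plus one trailing space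
theorem flatten_map_space (parts : List (List Char)) (h : parts ≠ []) :
    (parts.map (· ++ [' '])).flatten = PySem.Chars.join [' '] parts ++ [' '] := by
  induction parts with
  | nil => simp at h
  | cons x rest ih =>
    cases rest with
    | nil => simp [PySem.Chars.join, List.intercalate]
    | cons y r =>
      rw [List.map_cons, List.flatten_cons, ih (by simp), PySem.Chars.join_cons_cons]
      simp

-- a trailing space disappears under strip
theorem strip_append_space (x : List Char) :
    PySem.Chars.strip (x ++ [' ']) = PySem.Chars.strip x := by
  simp only [PySem.Chars.strip, PySem.Chars.lstrip, PySem.Chars.rstrip, List.dropWhile_append]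
  by_cases h : (List.dropWhile PySem.Chars.isspace x).isEmpty
  · rw [if_pos h, List.isEmpty_iff.mp h]
    decide
  · rw [if_neg h]
    simp [PySem.Chars.isspace]

-- ===== VERDICT (by name: the statement is the Claim_ definition above) =====
theorem extract_predicted_answer_spec : Claim_equal_extract_predicted_answer := by
  intro result _
  unfold Spec_extract_predicted_answer extract_predicted_answer extract_predicted_answer_alt
  simp only [PySem.List.slice?_none_none_neg_one, Option.getD_some]
  set ws := PySem.Chars.splitOn
      (PySem.List.pyGetD
        (PySem.Chars.splitOn (PySem.Chars.stripChars (PySem.Chars.strip result.toList) ['\n']) ['\n'])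
        (-1) [])
      [' '] with hws
  obtain ⟨hslice, -, -⟩ := pvCut_eq ws
  rw [pvALoop_eq, hslice, List.append_nil]
  by_cases hnil : (ws.reverse.takeWhile (fun e => !pvDelim e)).reverse = []
  · rw [hnil]; simp
  · rw [flatten_map_space _ hnil, strip_append_space]
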